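-- pv_equiv track=rewrite | github.com/saiyesaswym/Algorithms-DataStructures-using-Python | Amazon/WinningSequence/WinningSequence.py | winningSequence
-- ===== SOURCE A (Python) =====
-- def winningSequence(num, lowerEnd, upperEnd):
--     diff = upperEnd - lowerEnd
--
--     if num>(diff*2)+1:
--         return None
--
--     res=[]
--     res.append(upperEnd-1)
--     val = upperEnd
--     while val>=lowerEnd and len(res)<num:
--         res.append(val)
--         val-=1
--
--     rem=num-len(res)
--     res2=[]
--     val = upperEnd-1-rem
--     res2=[i for i in range(val,upperEnd-1)]
--     return res2+res
-- ===== SOURCE B (Python) =====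
-- def winningSequence(num, lowerEnd, upperEnd):
--     diff = upperEnd - lowerEnd
--     if num > diff * 2 + 1:
--         return None
--     if num <= 0:
--         return []
--     rem = max(0, num - (diff + 2))
--     peak = rem + 1
--     return [upperEnd - abs(i - peak) for i in range(num)]
-- ===== Notes on version B (the rewrite author's own statement) =====
-- stated objective: simpler
-- what changed: B recognizes the output as a mountain sequence peaking at upperEnd and emits it with one closed-form comprehension [upperEnd - abs(i - peak) for i in range(num)], replacing A's unconditional seed append, descending while-loop, ascending range-comprehension and list concatenation.
-- intended difference: For num <= 0 (when the guard still admits it) A returns [upperEnd-1], an artefact of its unconditional seed append; B returns [], the intended empty sequence when zero or fewer numbers are requested. — e.g. on winningSequence(0, 0, 5): A returns some [4], B returns some []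
import Mathlib
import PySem

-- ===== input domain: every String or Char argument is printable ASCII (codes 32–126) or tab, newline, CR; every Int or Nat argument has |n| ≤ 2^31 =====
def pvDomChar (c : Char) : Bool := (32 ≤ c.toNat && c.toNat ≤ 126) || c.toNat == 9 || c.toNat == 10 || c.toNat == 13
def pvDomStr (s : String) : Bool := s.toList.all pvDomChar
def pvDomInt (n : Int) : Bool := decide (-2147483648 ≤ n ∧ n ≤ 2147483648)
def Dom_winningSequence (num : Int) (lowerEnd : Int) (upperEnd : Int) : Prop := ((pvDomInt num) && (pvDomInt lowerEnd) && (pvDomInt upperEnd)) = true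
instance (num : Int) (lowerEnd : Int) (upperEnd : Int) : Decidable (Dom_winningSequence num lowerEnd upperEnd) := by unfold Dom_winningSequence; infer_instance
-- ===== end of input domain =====

-- B replaces A's seed-append + descending while-loop + ascending range + concatenation by one
-- closed-form mountain comprehension (objective: simpler); for num ≤ 0 B returns [] where A
-- returns [upperEnd-1] (stated as the intended difference D_ below).

-- ===== PORT A =====
-- the while loop: 'while val>=lowerEnd and len(res)<num: res.append(val); val-=1'
-- (fuel = val - lowerEnd + 1 bounds the iterations: val decreases by 1 each step and stays ≥ lowerEnd)
def pvLoopA (lowerEnd num : Int) : Nat → Int → List Int → List Int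
  | 0, _, res => res
  | fuel + 1, val, res =>
    if lowerEnd ≤ val ∧ (res.length : Int) < num then
      pvLoopA lowerEnd num fuel (val - 1) (res ++ [val])
    else res

def winningSequence (num : Int) (lowerEnd : Int) (upperEnd : Int) : Option (List Int) :=
  let diff := upperEnd - lowerEnd
  if num > diff * 2 + 1 then none
  else
    let res := pvLoopA lowerEnd num (upperEnd - lowerEnd + 1).toNat upperEnd [upperEnd - 1]
    let rem := num - (res.length : Int)
    let res2 := PySem.List.pyRange (upperEnd - 1 - rem) (upperEnd - 1) 1
    some (res2 ++ res)
-- ===== PORT B =====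
def winningSequence_alt (num : Int) (lowerEnd : Int) (upperEnd : Int) : Option (List Int) :=
  let diff := upperEnd - lowerEnd
  if num > diff * 2 + 1 then none
  else if num ≤ 0 then some []
  else
    let rem := max 0 (num - (diff + 2))
    let peak := rem + 1
    some ((PySem.List.pyRange 0 num 1).map (fun i => upperEnd - |i - peak|))

-- ===== PRECONDITION & SPEC =====
-- For num ≤ 0 (when the guard still admits it) A returns [upperEnd-1], an artefact of its
-- unconditional seed append; B returns [], the intended empty sequence when zero or fewer
-- numbers are requested.
def D_winningSequence (num : Int) (lowerEnd : Int) (upperEnd : Int) : Prop :=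
  num ≤ 0 ∧ num ≤ (upperEnd - lowerEnd) * 2 + 1
instance (num : Int) (lowerEnd : Int) (upperEnd : Int) : Decidable (D_winningSequence num lowerEnd upperEnd) := by unfold D_winningSequence; infer_instance

def Spec_winningSequence (num : Int) (lowerEnd : Int) (upperEnd : Int) (out : Option (List Int)) : Prop := ¬ D_winningSequence num lowerEnd upperEnd → out = winningSequence_alt num lowerEnd upperEnd
instance (num : Int) (lowerEnd : Int) (upperEnd : Int) (out : Option (List Int)) : Decidable (Spec_winningSequence num lowerEnd upperEnd out) := by unfold Spec_winningSequence; infer_instance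

def pvDiffWitness_winningSequence : Int × Int × Int := (0, 0, 5)
def pvDiffWitnessOut_winningSequence : (Option (List Int)) × (Option (List Int)) := (some [4], some [])

-- ===== CLAIM (what is proved, stated in full; the proofs are below) =====
def Claim_unchanged_winningSequence : Prop := ∀ (num : Int) (lowerEnd : Int) (upperEnd : Int), Dom_winningSequence num lowerEnd upperEnd → Spec_winningSequence num lowerEnd upperEnd (winningSequence num lowerEnd upperEnd)
def Claim_changed_winningSequence : Prop := Dom_winningSequence (pvDiffWitness_winningSequence.1) (pvDiffWitness_winningSequence.2.1) (pvDiffWitness_winningSequence.2.2) ∧ D_winningSequence (pvDiffWitness_winningSequence.1) (pvDiffWitness_winningSequence.2.1) (pvDiffWitness_winningSequence.2.2) ∧ winningSequence (pvDiffWitness_winningSequence.1) (pvDiffWitness_winningSequence.2.1) (pvDiffWitness_winningSequence.2.2) = pvDiffWitnessOut_winningSequence.1 ∧ winningSequence_alt (pvDiffWitness_winningSequence.1) (pvDiffWitness_winningSequence.2.1) (pvDiffWitness_winningSequence.2.2) = pvDiffWitnessOut_winningSequence.2 ∧ pvDiffWitnessOut_winningSequence.1 ≠ pvDiffWitnessO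ut_winningSequence.2
def Claim_exact_winningSequence : Prop := ∀ (num : Int) (lowerEnd : Int) (upperEnd : Int), Dom_winningSequence num lowerEnd upperEnd → D_winningSequence num lowerEnd upperEnd → winningSequence num lowerEnd upperEnd ≠ winningSequence_alt num lowerEnd upperEnd

-- ===== LEMMAS AND PROOFS =====

-- the while loop appends a descending run from val, stopping at lowerEnd or at length num
lemma pvLoopA_eq (lowerEnd num : Int) : ∀ (fuel : Nat) (val : Int) (res : List Int),
    fuel = (val - lowerEnd + 1).toNat →
    pvLoopA lowerEnd num fuel val res =
      res ++ (List.range (min (num - res.length).toNat fuel)).map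
        (fun (j : Nat) => val - (j : Int)) := by
  intro fuel
  induction fuel with
  | zero =>
    intro val res _
    simp [pvLoopA]
  | succ m ih =>
    intro val res hn
    rw [pvLoopA]
    by_cases h : lowerEnd ≤ val ∧ (res.length : Int) < num
    · rw [if_pos h]
      rw [ih (val - 1) (res ++ [val]) (by omega)]
      have hmin : min (num - res.length).toNat (m + 1) =
          (min (num - (res ++ [val]).length).toNat m) + 1 := by
        simp only [List.length_append, List.length_cons, List.length_nil,
          Nat.cast_add, Nat.cast_one]
        omega
      rw [hmin, List.range_succ_eq_map, List.append_assoc]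
      simp only [List.map_cons, List.map_map, Nat.cast_zero, sub_zero, List.singleton_append]
      congr 2
      exact List.map_congr_left (fun j _ => by simp; omega)
    · rw [if_neg h]
      have : min (num - res.length).toNat (m + 1) = 0 := by omega
      rw [this]
      simp

lemma pvLoopA_base (lowerEnd num upperEnd : Int) (h : num ≤ 1) :
    pvLoopA lowerEnd num (upperEnd - lowerEnd + 1).toNat upperEnd [upperEnd - 1]
      = [upperEnd - 1] := by
  rw [pvLoopA_eq lowerEnd num _ upperEnd [upperEnd - 1] rfl]
  have : min (num - ([upperEnd - 1] : List Int).length).toNat (upperEnd - lowerEnd + 1).toNat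
      = 0 := by simp; omega
  rw [this]
  simp

lemma winningSequence_of_D (num lowerEnd upperEnd : Int)
    (hd : D_winningSequence num lowerEnd upperEnd) :
    winningSequence num lowerEnd upperEnd = some [upperEnd - 1] := by
  obtain ⟨h0, hg⟩ := hd
  have hgate : ¬ num > (upperEnd - lowerEnd) * 2 + 1 := by omega
  simp only [winningSequence, if_neg hgate]
  rw [pvLoopA_base lowerEnd num upperEnd (by omega)]
  have hrem : upperEnd - 1 ≤ upperEnd - 1 - (num - (([upperEnd - 1] : List Int).length : Int)) := by
    simp; omega
  rw [PySem.List.pyRange_one_eq_nil hrem]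
  simp

-- main case: 1 ≤ num ≤ 2*diff+1
lemma main_eq (num lowerEnd upperEnd : Int) (h1 : 1 ≤ num)
    (hg : num ≤ (upperEnd - lowerEnd) * 2 + 1) :
    winningSequence num lowerEnd upperEnd = winningSequence_alt num lowerEnd upperEnd := by
  have hgate : ¬ num > (upperEnd - lowerEnd) * 2 + 1 := by omega
  have h0 : ¬ num ≤ 0 := by omega
  simp only [winningSequence, winningSequence_alt, if_neg hgate, if_neg h0]
  rw [pvLoopA_eq lowerEnd num _ upperEnd [upperEnd - 1] rfl]
  have hdiff : 0 ≤ upperEnd - lowerEnd := by omega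
  set k : Nat := min (num - (([upperEnd - 1] : List Int).length : Int)).toNat
      (upperEnd - lowerEnd + 1).toNat with hk
  have hklen : (k : Int) = min (num - 1) (upperEnd - lowerEnd + 1) := by
    simp [hk]; omega
  have hlenres : ((([upperEnd - 1] : List Int) ++
      (List.range k).map (fun (j : Nat) => upperEnd - (j : Int))).length : Int)
      = 1 + k := by simp; omega
  rw [hlenres]
  set rem : Int := num - (1 + (k : Int)) with hrem
  have hrem0 : 0 ≤ rem := by omega
  have hremB : rem = max 0 (num - (upperEnd - lowerEnd + 2)) := by omega
  congr 1
  rw [PySem.List.pyRange_one, PySem.List.pyRange_one]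
  apply List.ext_getElem
  · simp; omega
  · intro i hi1 hi2
    have hin : i < num.toNat := by simp at hi2; omega
    simp only [List.getElem_append, List.getElem_map, List.getElem_range,
      List.length_map, List.length_range, List.length_cons,
      List.length_nil, List.getElem_cons]
    have hpk : max 0 (num - (upperEnd - lowerEnd + 2)) + 1 = rem + 1 := by omega
    rw [hpk]
    split_ifs with hA hB hC
    · -- ascending res2 part: i < rem
      have hir : (i : Int) < rem := by
        simp at hA; omega
      rcases abs_cases ((0 + (i : Int)) - (rem + 1)) with ⟨he, _⟩ | ⟨he, _⟩ <;> rw [he] <;> omega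
    · -- the seed element: i = rem
      simp at hA hB
      have : (i : Int) = rem := by omega
      rcases abs_cases ((0 + (i : Int)) - (rem + 1)) with ⟨he, _⟩ | ⟨he, _⟩ <;> rw [he] <;> omega
    · -- impossible branch: indexing past the singleton [upperEnd - 1] within its cons split
      exact absurd hB (by omega)
    · -- descending part
      simp only [not_lt] at hA hB
      rw [show |0 + (i : Int) - (rem + 1)| = 0 + (i : Int) - (rem + 1) from
        abs_of_nonneg (by omega)]
      omega

-- ===== VERDICT (by name: the statement is the Claim_ definition above) =====
theorem winningSequence_spec : Claim_unchanged_winningSequence := by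
  intro num lowerEnd upperEnd _ hnd
  by_cases hg : num > (upperEnd - lowerEnd) * 2 + 1
  · unfold winningSequence winningSequence_alt
    simp [hg]
  · by_cases h0 : num ≤ 0
    · exact absurd ⟨h0, by omega⟩ hnd
    · exact main_eq num lowerEnd upperEnd (by omega) (by omega)

theorem winningSequence_changed : Claim_changed_winningSequence := by
  unfold Claim_changed_winningSequence; decide

theorem winningSequence_tight : Claim_exact_winningSequence := by
  intro num lowerEnd upperEnd _ hd
  rw [winningSequence_of_D num lowerEnd upperEnd hd]
  obtain ⟨h0, hg⟩ := hd
  have hgate : ¬ num > (upperEnd - lowerEnd) * 2 + 1 := by omega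
  simp only [winningSequence_alt, if_neg hgate, if_pos h0]
  simp
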